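-- pv_equiv track=rewrite | github.com/NicolasJorquera/Python-simulation | timeResponseGonzalo/simulacion.py | rendimiento
-- ===== SOURCE A (Python) =====
-- def rendimiento(tiempo, llegadas, finalizadas, rendStep):
--     tiempoNuevo = []
--     llegadasNuevo = []
--     finalizadasNuevo = []
--     for segundo in tiempo:
--         if segundo == 0:
--             tiempoNuevo.append(segundo)
--             llegadasNuevo.append(llegadas[segundo])
--             finalizadasNuevo.append(len(finalizadas[segundo]))
--         else:
--
--             step = int(rendStep)*60
--             if (segundo) % step == 0:
--                 tiempoNuevo.append(segundo)
--                 if segundo >= len(llegadas):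
--                     llegadasNuevo.append(0)
--                 else:
--                     llegadasNuevo.append(llegadas[segundo])
--                 finalizadasNuevo.append(len(finalizadas[segundo]))
--             else:
--                 if segundo >= len(llegadas):
--                     llegadasNuevo[-1] = llegadasNuevo[-1] + 0
--                 else:
--                     llegadasNuevo[-1] = llegadasNuevo[-1] + llegadas[segundo]
--                 finalizadasNuevo[-1] = finalizadasNuevo[-1] + len(finalizadas[segundo])
--
--     return tiempoNuevo, llegadasNuevo, finalizadasNuevo
-- ===== SOURCE B (Python) =====
-- def rendimiento(tiempo, llegadas, finalizadas, rendStep):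
--     # group-then-aggregate: first partition tiempo into consecutive bucket groups,
--     # then reduce each group to one output entry per parallel list
--     step = int(rendStep) * 60
--     groups = []
--     for segundo in tiempo:
--         if segundo == 0 or segundo % step == 0:
--             groups.append([segundo])
--         else:
--             groups[-1].append(segundo)
--     tiempoNuevo = [g[0] for g in groups]
--     llegadasNuevo = [sum(llegadas[s] if s < len(llegadas) else 0 for s in g) for g in groups]
--     finalizadasNuevo = [sum(len(finalizadas[s]) for s in g) for g in groups]
--     return tiempoNuevo, llegadasNuevo, finalizadasNuevo
-- ===== Notes on version B (the rewrite author's own statement) =====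
-- stated objective: alternative
-- what changed: Replaces A's single pass with in-place [-1] accumulator mutation by a group-then-reduce decomposition: one pass partitions tiempo into consecutive bucket groups, then each group is reduced independently into the three parallel output lists.
import Mathlib
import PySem

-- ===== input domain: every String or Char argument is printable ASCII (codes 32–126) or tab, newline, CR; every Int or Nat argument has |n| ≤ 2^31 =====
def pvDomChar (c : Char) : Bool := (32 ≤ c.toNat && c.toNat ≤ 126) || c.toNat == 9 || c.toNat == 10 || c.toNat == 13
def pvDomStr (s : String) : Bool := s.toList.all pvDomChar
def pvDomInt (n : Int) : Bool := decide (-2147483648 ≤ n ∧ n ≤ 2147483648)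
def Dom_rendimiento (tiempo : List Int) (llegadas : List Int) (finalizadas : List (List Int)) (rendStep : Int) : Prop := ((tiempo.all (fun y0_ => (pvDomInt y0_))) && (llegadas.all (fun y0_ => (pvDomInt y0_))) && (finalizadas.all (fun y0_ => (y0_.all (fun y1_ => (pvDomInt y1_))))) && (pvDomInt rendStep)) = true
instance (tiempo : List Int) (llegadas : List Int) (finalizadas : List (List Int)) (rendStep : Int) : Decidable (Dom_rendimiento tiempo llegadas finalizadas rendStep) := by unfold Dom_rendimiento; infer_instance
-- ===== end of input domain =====

-- B replaces A's in-place [-1]-accumulator pass by a group-then-reduce decomposition (objective: alternative, same cost).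

-- ===== PORT A =====
-- one loop-body iteration of A: state = the three output lists, last elements mutated on non-bucket seconds
def stepA (llegadas : List Int) (finalizadas : List (List Int)) (rendStep : Int)
    (st : List Int × List Int × List Int) (segundo : Int) : List Int × List Int × List Int :=
  if segundo = 0 then
    (st.1 ++ [segundo],
     st.2.1 ++ [(PySem.List.pyGet? llegadas segundo).getD 0],
     st.2.2 ++ [(((PySem.List.pyGet? finalizadas segundo).getD []).length : Int)])
  else
    let step := rendStep * 60
    if PySem.Int.mod segundo step = 0 then
      (st.1 ++ [segundo],
       (if segundo ≥ (llegadas.length : Int) then st.2.1 ++ [0]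
        else st.2.1 ++ [(PySem.List.pyGet? llegadas segundo).getD 0]),
       st.2.2 ++ [(((PySem.List.pyGet? finalizadas segundo).getD []).length : Int)])
    else
      (st.1,
       (if segundo ≥ (llegadas.length : Int) then st.2.1.dropLast ++ [st.2.1.getLast?.getD 0 + 0]
        else st.2.1.dropLast ++ [st.2.1.getLast?.getD 0 + (PySem.List.pyGet? llegadas segundo).getD 0]),
       st.2.2.dropLast ++ [st.2.2.getLast?.getD 0 + (((PySem.List.pyGet? finalizadas segundo).getD []).length : Int)])

def rendimiento (tiempo : List Int) (llegadas : List Int) (finalizadas : List (List Int)) (rendStep : Int) : List Int × List Int × List Int :=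
  tiempo.foldl (stepA llegadas finalizadas rendStep) ([], [], [])

-- ===== PORT B =====
-- one iteration of B's first pass: partition tiempo into consecutive bucket groups
def stepB (rendStep : Int) (gs : List (List Int)) (segundo : Int) : List (List Int) :=
  if segundo = 0 ∨ PySem.Int.mod segundo (rendStep * 60) = 0 then gs ++ [[segundo]]
  else gs.dropLast ++ [gs.getLast?.getD [] ++ [segundo]]

def rendimiento_alt (tiempo : List Int) (llegadas : List Int) (finalizadas : List (List Int)) (rendStep : Int) : List Int × List Int × List Int :=
  let groups := tiempo.foldl (stepB rendStep) []
  (groups.map (fun g => g.headD 0),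
   groups.map (fun g => g.foldl (fun acc s =>
      acc + (if s < (llegadas.length : Int) then (PySem.List.pyGet? llegadas s).getD 0 else 0)) 0),
   groups.map (fun g => g.foldl (fun acc s =>
      acc + (((PySem.List.pyGet? finalizadas s).getD []).length : Int)) 0))

-- ===== PRECONDITION & SPEC =====
-- Pre_ is exactly where the Python A returns (it raises otherwise): for segundo = 0 both llegadas[0] and
-- finalizadas[0] must exist; for segundo ≠ 0 the step divisor must be nonzero, finalizadas[segundo] must be a
-- valid (possibly negative) Python index, llegadas[segundo] likewise whenever the guard segundo < len(llegadas)
-- lets A read it; and the first second must open a bucket (else llegadasNuevo[-1] hits an empty list).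
def Pre_rendimiento (tiempo : List Int) (llegadas : List Int) (finalizadas : List (List Int)) (rendStep : Int) : Prop :=
  (∀ s ∈ tiempo,
     (s = 0 → llegadas ≠ [] ∧ finalizadas ≠ []) ∧
     (s ≠ 0 → rendStep ≠ 0 ∧
        (-(finalizadas.length : Int) ≤ s ∧ s < (finalizadas.length : Int)) ∧
        (s < (llegadas.length : Int) → -(llegadas.length : Int) ≤ s))) ∧
  (tiempo.headD 0 = 0 ∨ (rendStep * 60) ∣ tiempo.headD 0)
instance (tiempo : List Int) (llegadas : List Int) (finalizadas : List (List Int)) (rendStep : Int) : Decidable (Pre_rendimiento tiempo llegadas finalizadas rendStep) := by unfold Pre_rendimiento; infer_instance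
def pvWitness_rendimiento : List Int × List Int × List (List Int) × Int := ([0, 1, 2], [5, 7, 2], [[1], [2, 3], []], 1)
def Spec_rendimiento (tiempo : List Int) (llegadas : List Int) (finalizadas : List (List Int)) (rendStep : Int) (out : List Int × List Int × List Int) : Prop := out = rendimiento_alt tiempo llegadas finalizadas rendStep
instance (tiempo : List Int) (llegadas : List Int) (finalizadas : List (List Int)) (rendStep : Int) (out : List Int × List Int × List Int) : Decidable (Spec_rendimiento tiempo llegadas finalizadas rendStep out) := by unfold Spec_rendimiento; infer_instance

-- ===== CLAIM (what is proved, stated in full; the proofs are below) =====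
def Claim_equal_rendimiento : Prop := ∀ (tiempo : List Int) (llegadas : List Int) (finalizadas : List (List Int)) (rendStep : Int), Dom_rendimiento tiempo llegadas finalizadas rendStep → Pre_rendimiento tiempo llegadas finalizadas rendStep → Spec_rendimiento tiempo llegadas finalizadas rendStep (rendimiento tiempo llegadas finalizadas rendStep)

-- ===== LEMMAS AND PROOFS =====

-- B's per-second llegadas contribution
def lContrib (llegadas : List Int) (s : Int) : Int :=
  if s < (llegadas.length : Int) then (PySem.List.pyGet? llegadas s).getD 0 else 0

-- B's per-second finalizadas contribution
def fContrib (finalizadas : List (List Int)) (s : Int) : Int :=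
  (((PySem.List.pyGet? finalizadas s).getD []).length : Int)

-- B's reduction of one group
def lsum (llegadas : List Int) (g : List Int) : Int := g.foldl (fun acc s => acc + lContrib llegadas s) 0
def fsum (finalizadas : List (List Int)) (g : List Int) : Int := g.foldl (fun acc s => acc + fContrib finalizadas s) 0

-- A's state seen as the aggregation of B's groups
def agg (llegadas : List Int) (finalizadas : List (List Int)) (gs : List (List Int)) : List Int × List Int × List Int :=
  (gs.map (fun g => g.headD 0), gs.map (lsum llegadas), gs.map (fsum finalizadas))

theorem lContrib_zero (llegadas : List Int) :
    (PySem.List.pyGet? llegadas 0).getD 0 = lContrib llegadas 0 := by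
  cases llegadas with
  | nil => rfl
  | cons a t =>
    have h : (0 : Int) < ((a :: t).length : Int) := by
      simp only [List.length_cons]; push_cast; omega
    simp only [lContrib, if_pos h]

-- A's loop body in B's uniform "start / extend" shape
theorem stepA_eq (llegadas : List Int) (finalizadas : List (List Int)) (rendStep : Int)
    (st : List Int × List Int × List Int) (s : Int) :
    stepA llegadas finalizadas rendStep st s =
      if s = 0 ∨ PySem.Int.mod s (rendStep * 60) = 0 then
        (st.1 ++ [s], st.2.1 ++ [lContrib llegadas s], st.2.2 ++ [fContrib finalizadas s])
      else
        (st.1, st.2.1.dropLast ++ [st.2.1.getLast?.getD 0 + lContrib llegadas s],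
         st.2.2.dropLast ++ [st.2.2.getLast?.getD 0 + fContrib finalizadas s]) := by
  by_cases h0 : s = 0
  · subst h0
    simp [stepA, fContrib, lContrib_zero]
  · by_cases hm : PySem.Int.mod s (rendStep * 60) = 0 <;>
      by_cases hl : (llegadas.length : Int) ≤ s
    · have hk : ¬ s < (llegadas.length : Int) := not_lt.mpr hl
      simp [stepA, fContrib, lContrib, h0, hm, ge_iff_le, hl, hk]
    · have hk : s < (llegadas.length : Int) := not_le.mp hl
      simp [stepA, fContrib, lContrib, h0, hm, ge_iff_le, hl, hk]
    · have hk : ¬ s < (llegadas.length : Int) := not_lt.mpr hl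
      simp [stepA, fContrib, lContrib, h0, hm, ge_iff_le, hl, hk]
    · have hk : s < (llegadas.length : Int) := not_le.mp hl
      simp [stepA, fContrib, lContrib, h0, hm, ge_iff_le, hl, hk]

theorem lsum_concat (llegadas : List Int) (g : List Int) (s : Int) :
    lsum llegadas (g ++ [s]) = lsum llegadas g + lContrib llegadas s := by
  simp [lsum, List.foldl_append]

theorem fsum_concat (finalizadas : List (List Int)) (g : List Int) (s : Int) :
    fsum finalizadas (g ++ [s]) = fsum finalizadas g + fContrib finalizadas s := by
  simp [fsum, List.foldl_append]

-- one step of A's fold equals one step of B's grouping, through agg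
theorem step_agg (llegadas : List Int) (finalizadas : List (List Int)) (rendStep : Int)
    (gs : List (List Int)) (s : Int)
    (hne : gs ≠ [] ∨ (s = 0 ∨ PySem.Int.mod s (rendStep * 60) = 0))
    (hgr : ∀ g ∈ gs, g ≠ []) :
    stepA llegadas finalizadas rendStep (agg llegadas finalizadas gs) s =
      agg llegadas finalizadas (stepB rendStep gs s) := by
  rw [stepA_eq]
  unfold stepB
  by_cases h : s = 0 ∨ PySem.Int.mod s (rendStep * 60) = 0
  · simp [h, agg, lsum, fsum]
  · have hgs : gs ≠ [] := hne.resolve_right h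
    obtain ⟨init, last, rfl⟩ := gs.eq_nil_or_concat'.resolve_left hgs
    have hlast : last ≠ [] := hgr last (by simp)
    simp only [h, if_false, agg, List.map_append, List.map_cons, List.map_nil,
      List.dropLast_concat, List.getLast?_concat, Option.getD_some, lsum_concat, fsum_concat]
    congr 2
    cases last with
    | nil => exact absurd rfl hlast
    | cons a t => simp

-- main invariant: A's fold from agg gs equals agg of B's fold from gs
theorem main_invariant (llegadas : List Int) (finalizadas : List (List Int)) (rendStep : Int)
    (ts : List Int) (gs : List (List Int)) (hgs : gs ≠ []) (hgr : ∀ g ∈ gs, g ≠ []) :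
    ts.foldl (stepA llegadas finalizadas rendStep) (agg llegadas finalizadas gs) =
      agg llegadas finalizadas (ts.foldl (stepB rendStep) gs) := by
  induction ts generalizing gs with
  | nil => rfl
  | cons s ts ih =>
    simp only [List.foldl_cons]
    rw [step_agg llegadas finalizadas rendStep gs s (Or.inl hgs) hgr]
    apply ih
    · unfold stepB; split_ifs with h <;> simp
    · intro g hg
      unfold stepB at hg
      split_ifs at hg with h
      · rcases List.mem_append.mp hg with h1 | h1
        · exact hgr g h1
        · simp at h1; subst h1; simp
      · rcases List.mem_append.mp hg with h1 | h1
        · exact hgr g (List.dropLast_subset _ h1)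
        · simp at h1; subst h1; simp

-- ===== VERDICT (by name: the statement is the Claim_ definition above) =====
theorem rendimiento_spec : Claim_equal_rendimiento := by
  intro tiempo llegadas finalizadas rendStep _hDom hPre
  unfold Spec_rendimiento rendimiento rendimiento_alt
  obtain ⟨_hEl, hHead⟩ := hPre
  cases tiempo with
  | nil => rfl
  | cons t ts =>
    have hstart : t = 0 ∨ PySem.Int.mod t (rendStep * 60) = 0 := by
      rcases hHead with h | h
      · left; simpa using h
      · right; rw [PySem.Int.mod_eq_zero_iff_dvd]; simpa using h
    have h1 : stepB rendStep [] t = [[t]] := by simp [stepB, hstart]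
    have hfirst : stepA llegadas finalizadas rendStep ([], [], []) t =
        agg llegadas finalizadas [[t]] := by
      have := step_agg llegadas finalizadas rendStep [] t (Or.inr hstart) (by simp)
      rwa [show agg llegadas finalizadas [] = (([], [], []) : List Int × List Int × List Int) from rfl, h1] at this
    simp only [List.foldl_cons, h1, hfirst]
    exact congrArg (fun r => (r.1, r.2.1, r.2.2))
      (main_invariant llegadas finalizadas rendStep ts [[t]] (by simp) (by simp))
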